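-- pv_equiv track=rewrite | github.com/qucavillamorcoc-cell/casa-de-liberty | core/views.py | _normalized_photo_urls
-- ===== SOURCE A (Python) =====
-- def _normalized_photo_urls(raw_values):
--     """Parse comma/newline-separated URL values into a clean list."""
--     photo_urls = []
--     for raw in raw_values:
--         if not raw:
--             continue
--         for line in str(raw).replace('\r', '\n').split('\n'):
--             for value in line.split(','):
--                 url = value.strip()
--                 if url:
--                     photo_urls.append(url)
--     return photo_urls
-- ===== SOURCE B (Python) =====
-- def _normalized_photo_urls(raw_values):
--     """Parse comma/newline-separated URL values into a clean list (single scan)."""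
--     photo_urls = []
--     for raw in raw_values:
--         if not raw:
--             continue
--         buf = []
--         for ch in str(raw):
--             if ch in ',\r\n':
--                 url = ''.join(buf).strip()
--                 if url:
--                     photo_urls.append(url)
--                 buf = []
--             else:
--                 buf.append(ch)
--         url = ''.join(buf).strip()
--         if url:
--             photo_urls.append(url)
--     return photo_urls
-- ===== Notes on version B (the rewrite author's own statement) =====
-- stated objective: alternative
-- what changed: A normalizes '\r' to '\n', splits on '\n', then splits each line on ',' in nested loops; B makes a single character-level pass per string, accumulating a token buffer and flushing the stripped token at each of ',', '\r', '\n' and at the end, so the replace pass and both split passes disappear.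
import Mathlib
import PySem

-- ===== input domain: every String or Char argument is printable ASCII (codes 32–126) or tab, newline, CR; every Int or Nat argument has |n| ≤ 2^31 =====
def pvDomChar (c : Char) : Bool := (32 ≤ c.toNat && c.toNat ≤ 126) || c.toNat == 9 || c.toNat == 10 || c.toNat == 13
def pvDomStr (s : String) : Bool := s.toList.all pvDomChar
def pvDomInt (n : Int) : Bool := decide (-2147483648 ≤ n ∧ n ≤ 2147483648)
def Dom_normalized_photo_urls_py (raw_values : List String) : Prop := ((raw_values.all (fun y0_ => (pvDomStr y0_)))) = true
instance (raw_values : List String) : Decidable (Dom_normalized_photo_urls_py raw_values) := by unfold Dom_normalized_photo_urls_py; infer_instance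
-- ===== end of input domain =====

-- B replaces A's replace('\r','\n') + two nested splits with a single character-level
-- scanner that flushes a token buffer at each delimiter; objective: alternative decomposition.


-- ===== PORT A =====
-- A: for each truthy raw, replace '\r'→'\n', split on '\n', split each line on ',',
-- strip each value and append when non-empty (strings handled on the List Char side via PySem.Chars).
-- the innermost append step: url = value.strip(); if url: photo_urls.append(url)
def aStep (acc3 : List String) (value : List Char) : List String :=
  let url := PySem.Chars.strip value
  if url.isEmpty then acc3 else acc3 ++ [String.ofList url]

def normalized_photo_urls_py (raw_values : List String) : List String :=
  raw_values.foldl (fun acc raw =>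
    if raw.toList = [] then acc
    else
      (PySem.Chars.splitOn (PySem.Chars.replace raw.toList ['\r'] ['\n']) ['\n']).foldl
        (fun acc2 line =>
          (PySem.Chars.splitOn line [',']).foldl aStep acc2) acc) []

-- ===== PORT B =====
-- B: one pass over the characters, flushing the stripped buffer at ',', '\r', '\n' and at the end.
-- url = ''.join(buf).strip(); if url: photo_urls.append(url)
def altFlush (acc : List String) (buf : List Char) : List String :=
  let url := PySem.Str.strip (String.ofList buf)
  if url = "" then acc else acc ++ [url]

def altScan : List Char → List Char → List String → List String
  | [], buf, acc => altFlush acc buf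
  | c :: t, buf, acc =>
      if c = ',' ∨ c = '\r' ∨ c = '\n' then altScan t [] (altFlush acc buf)
      else altScan t (buf ++ [c]) acc

def normalized_photo_urls_py_alt (raw_values : List String) : List String :=
  raw_values.foldl (fun acc raw =>
    if raw.toList = [] then acc else altScan raw.toList [] acc) []

-- ===== PRECONDITION & SPEC =====
def Spec_normalized_photo_urls_py (raw_values : List String) (out : List String) : Prop := out = normalized_photo_urls_py_alt raw_values
instance (raw_values : List String) (out : List String) : Decidable (Spec_normalized_photo_urls_py raw_values out) := by unfold Spec_normalized_photo_urls_py; infer_instance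

-- ===== CLAIM (what is proved, stated in full; the proofs are below) =====
def Claim_equal_normalized_photo_urls_py : Prop := ∀ (raw_values : List String), Dom_normalized_photo_urls_py raw_values → Spec_normalized_photo_urls_py raw_values (normalized_photo_urls_py raw_values)

-- ===== LEMMAS AND PROOFS =====

-- split of a char list on ONE delimiter char, with the pending prefix of the first piece
def spChar (d : Char) : List Char → List Char → List (List Char)
  | pre, [] => [pre]
  | pre, c :: t => if c = d then pre :: spChar d [] t else spChar d (pre ++ [c]) t

-- split on the delimiter SET {',', '\r', '\n'}
def spSet : List Char → List Char → List (List Char)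
  | pre, [] => [pre]
  | pre, c :: t => if c = ',' ∨ c = '\r' ∨ c = '\n' then pre :: spSet [] t else spSet (pre ++ [c]) t

def replCR (c : Char) : Char := if c = '\r' then '\n' else c

def cleanTokens (ts : List (List Char)) : List String :=
  ts.filterMap (fun t =>
    let u := PySem.Chars.strip t
    if u.isEmpty then none else some (String.ofList u))

theorem replace_go_single (fuel : Nat) : ∀ (l acc : List Char), l.length ≤ fuel →
    PySem.Chars.replace.go ['\r'] ['\n'] fuel l acc = acc.reverse ++ l.map replCR := by
  induction fuel with
  | zero => intro l acc h; cases l with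
    | nil => simp [PySem.Chars.replace.go]
    | cons c t => simp at h
  | succ n ih =>
    intro l acc h
    cases l with
    | nil => simp [PySem.Chars.replace.go]
    | cons c t =>
      have ht : t.length ≤ n := by simpa using h
      by_cases hc : '\r' = c
      · rw [show PySem.Chars.replace.go ['\r'] ['\n'] (n+1) (c::t) acc
              = PySem.Chars.replace.go ['\r'] ['\n'] n t ('\n'::acc) from by
            simp [PySem.Chars.replace.go, List.isPrefixOf, ← hc]]
        rw [ih t ('\n'::acc) ht]
        simp [replCR, ← hc]
      · rw [show PySem.Chars.replace.go ['\r'] ['\n'] (n+1) (c::t) acc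
              = PySem.Chars.replace.go ['\r'] ['\n'] n t (c::acc) from by
            simp [PySem.Chars.replace.go, List.isPrefixOf, hc]]
        rw [ih t (c::acc) ht]
        simp [replCR, Ne.symm hc]

theorem replace_single (l : List Char) :
    PySem.Chars.replace l ['\r'] ['\n'] = l.map replCR := by
  simp only [PySem.Chars.replace, List.isEmpty_cons]
  simpa using replace_go_single l.length l [] le_rfl

theorem splitOn_go_single (d : Char) (fuel : Nat) :
    ∀ (l cur : List Char) (acc : List (List Char)), l.length ≤ fuel →
    PySem.Chars.splitOn.go [d] fuel l cur acc = acc.reverse ++ spChar d cur.reverse l := by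
  induction fuel with
  | zero => intro l cur acc h; cases l with
    | nil => simp [PySem.Chars.splitOn.go, spChar]
    | cons c t => simp at h
  | succ n ih =>
    intro l cur acc h
    cases l with
    | nil => simp [PySem.Chars.splitOn.go, spChar]
    | cons c t =>
      have ht : t.length ≤ n := by simpa using h
      by_cases hc : d = c
      · rw [show PySem.Chars.splitOn.go [d] (n+1) (c::t) cur acc
              = PySem.Chars.splitOn.go [d] n t [] (cur.reverse :: acc) from by
            simp [PySem.Chars.splitOn.go, List.isPrefixOf, ← hc]]
        rw [ih t [] (cur.reverse :: acc) ht]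
        simp only [spChar, if_pos hc.symm]
        simp
      · rw [show PySem.Chars.splitOn.go [d] (n+1) (c::t) cur acc
              = PySem.Chars.splitOn.go [d] n t (c::cur) acc from by
            simp [PySem.Chars.splitOn.go, List.isPrefixOf, hc]]
        rw [ih t (c::cur) acc ht]
        simp only [spChar, if_neg (Ne.symm hc)]
        simp

theorem splitOn_single (d : Char) (l : List Char) :
    PySem.Chars.splitOn l [d] = spChar d [] l := by
  simpa using splitOn_go_single d (l.length + 1) l [] [] (Nat.le_succ _)

theorem spChar_ne_nil (d : Char) (pre l : List Char) : spChar d pre l ≠ [] := by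
  induction l generalizing pre with
  | nil => simp [spChar]
  | cons c t ih => simp only [spChar]; split <;> simp [ih]

theorem spChar_pre (d : Char) (pre l : List Char) :
    spChar d pre l = (spChar d [] l).modifyHead (pre ++ ·) := by
  induction l generalizing pre with
  | nil => simp [spChar]
  | cons c t ih =>
    simp only [spChar]
    by_cases hc : c = d
    · simp [hc]
    · simp only [List.nil_append]
      rw [if_neg hc, if_neg hc, ih (pre ++ [c]), ih [c]]
      cases h : spChar d [] t with
      | nil => exact absurd h (spChar_ne_nil d [] t)
      | cons a b => simp

theorem spSet_ne_nil (pre l : List Char) : spSet pre l ≠ [] := by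
  induction l generalizing pre with
  | nil => simp [spSet]
  | cons c t ih => simp only [spSet]; split <;> simp [ih]

theorem spSet_pre (pre l : List Char) :
    spSet pre l = (spSet [] l).modifyHead (pre ++ ·) := by
  induction l generalizing pre with
  | nil => simp [spSet]
  | cons c t ih =>
    simp only [spSet]
    by_cases hc : c = ',' ∨ c = '\r' ∨ c = '\n'
    · simp [hc]
    · simp only [List.nil_append]
      rw [if_neg hc, if_neg hc, ih (pre ++ [c]), ih [c]]
      cases h : spSet [] t with
      | nil => exact absurd h (spSet_ne_nil [] t)
      | cons a b => simp

-- A's two nested single-char splits over the '\r'-replaced chars ARE the split on the delimiter set.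
theorem nested_eq_spSet (l : List Char) :
    (spChar '\n' [] (l.map replCR)).flatMap (spChar ',' []) = spSet [] l := by
  induction l with
  | nil => simp [spChar, spSet]
  | cons c t ih =>
    by_cases hd : c = ',' ∨ c = '\r' ∨ c = '\n'
    · rw [show spSet [] (c::t) = [] :: spSet [] t from by simp [spSet, hd]]
      by_cases hcm : c = ','
      · subst hcm
        rw [show (','::t).map replCR = ',' :: t.map replCR from by simp [replCR]]
        rw [show spChar '\n' [] (',' :: t.map replCR)
              = (spChar '\n' [] (t.map replCR)).modifyHead ([','] ++ ·) from by
            rw [show spChar '\n' [] (',' :: t.map replCR) = spChar '\n' ([] ++ [',']) (t.map replCR) from by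
              simp [spChar]]
            rw [spChar_pre]; simp]
        cases h : spChar '\n' [] (t.map replCR) with
        | nil => exact absurd h (spChar_ne_nil _ _ _)
        | cons a b =>
          rw [h] at ih
          simp only [List.modifyHead, List.flatMap_cons, List.singleton_append] at ih ⊢
          rw [show spChar ',' [] (',' :: a) = [] :: spChar ',' [] a from by simp [spChar]]
          rw [← ih]
          simp
      · have hr : replCR c = '\n' := by
          rcases hd with h | h | h
          · exact absurd h hcm
          · simp [replCR, h]
          · simp [replCR, h]
        rw [show (c::t).map replCR = '\n' :: t.map replCR from by simp [hr]]
        rw [show spChar '\n' [] ('\n' :: t.map replCR) = [] :: spChar '\n' [] (t.map replCR) from by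
          simp [spChar]]
        rw [List.flatMap_cons, ← ih]
        simp [spChar]
    · have hcm : c ≠ ',' := fun h => hd (Or.inl h)
      have hcr : c ≠ '\r' := fun h => hd (Or.inr (Or.inl h))
      have hcn : c ≠ '\n' := fun h => hd (Or.inr (Or.inr h))
      rw [show spSet [] (c::t) = (spSet [] t).modifyHead ([c] ++ ·) from by
        rw [show spSet [] (c::t) = spSet ([] ++ [c]) t from by simp [spSet, hd]]
        rw [spSet_pre]; simp]
      rw [show (c::t).map replCR = c :: t.map replCR from by simp [replCR, hcr]]
      rw [show spChar '\n' [] (c :: t.map replCR)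
            = (spChar '\n' [] (t.map replCR)).modifyHead ([c] ++ ·) from by
          rw [show spChar '\n' [] (c :: t.map replCR) = spChar '\n' ([] ++ [c]) (t.map replCR) from by
            simp [spChar, hcn]]
          rw [spChar_pre]; simp]
      cases h : spChar '\n' [] (t.map replCR) with
      | nil => exact absurd h (spChar_ne_nil _ _ _)
      | cons a b =>
        rw [h] at ih
        simp only [List.modifyHead, List.flatMap_cons, List.singleton_append] at ih ⊢
        rw [show spChar ',' [] (c :: a) = (spChar ',' [] a).modifyHead ([c] ++ ·) from by
            rw [show spChar ',' [] (c :: a) = spChar ',' ([] ++ [c]) a from by simp [spChar, hcm]]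
            rw [spChar_pre]; simp]
        cases h2 : spChar ',' [] a with
        | nil => exact absurd h2 (spChar_ne_nil _ _ _)
        | cons a2 b2 =>
          rw [h2] at ih
          cases h3 : spSet [] t with
          | nil => exact absurd h3 (spSet_ne_nil _ _)
          | cons s ss =>
            rw [h3] at ih
            simp only [List.modifyHead, List.cons_append, List.nil_append] at ih ⊢
            have h4 : a2 = s := List.head_eq_of_cons_eq ih
            have h5 : b2 ++ b.flatMap (spChar ',' []) = ss := List.tail_eq_of_cons_eq ih
            rw [h4, ← h5]

-- A's inner foldl append-if loop over tokens is acc ++ cleanTokens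
theorem inner_foldl (ts : List (List Char)) (acc : List String) :
    ts.foldl aStep acc = acc ++ cleanTokens ts := by
  induction ts generalizing acc with
  | nil => simp [cleanTokens]
  | cons v vs ih =>
    rw [List.foldl_cons, ih]
    unfold aStep cleanTokens
    by_cases h : PySem.Chars.strip v = [] <;> simp [List.isEmpty_iff, h]

theorem cleanTokens_append (ts us : List (List Char)) :
    cleanTokens (ts ++ us) = cleanTokens ts ++ cleanTokens us := by
  simp [cleanTokens]

-- A's outer foldl over lines
theorem outer_foldl (lines : List (List Char)) (acc : List String) :
    lines.foldl (fun acc2 line => (PySem.Chars.splitOn line [',']).foldl aStep acc2) acc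
      = acc ++ cleanTokens (lines.flatMap (spChar ',' [])) := by
  induction lines generalizing acc with
  | nil => simp [cleanTokens]
  | cons l ls ih =>
    simp only [List.foldl_cons, List.flatMap_cons]
    rw [splitOn_single, inner_foldl, ih, cleanTokens_append, List.append_assoc]

-- B's scanner computes acc ++ cleanTokens of the set-split
theorem altScan_spec (cs : List Char) : ∀ (buf : List Char) (acc : List String),
    altScan cs buf acc = acc ++ cleanTokens (spSet buf cs) := by
  induction cs with
  | nil =>
    intro buf acc
    show altFlush acc buf = acc ++ cleanTokens [buf]
    unfold altFlush cleanTokens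
    simp only [PySem.Str.strip, String.toList_ofList]
    by_cases h : PySem.Chars.strip buf = [] <;> simp [h]
  | cons c t ih =>
    intro buf acc
    by_cases hd : c = ',' ∨ c = '\r' ∨ c = '\n'
    · rw [show altScan (c::t) buf acc = altScan t [] (altFlush acc buf) from by
          simp [altScan, hd]]
      rw [show spSet buf (c::t) = buf :: spSet [] t from by simp [spSet, hd]]
      rw [ih [] (altFlush acc buf)]
      unfold altFlush cleanTokens
      simp only [PySem.Str.strip, String.toList_ofList]
      by_cases h : PySem.Chars.strip buf = [] <;> simp [h]
    · rw [show altScan (c::t) buf acc = altScan t (buf ++ [c]) acc from by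
          simp [altScan, hd]]
      rw [show spSet buf (c::t) = spSet (buf ++ [c]) t from by simp [spSet, hd]]
      rw [ih (buf ++ [c]) acc]

theorem per_string (cs : List Char) (acc : List String) :
    (PySem.Chars.splitOn (PySem.Chars.replace cs ['\r'] ['\n']) ['\n']).foldl
        (fun acc2 line => (PySem.Chars.splitOn line [',']).foldl aStep acc2) acc
      = altScan cs [] acc := by
  rw [replace_single, splitOn_single, outer_foldl, nested_eq_spSet, altScan_spec]

theorem ports_eq (raw_values : List String) :
    normalized_photo_urls_py raw_values = normalized_photo_urls_py_alt raw_values := by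
  unfold normalized_photo_urls_py normalized_photo_urls_py_alt
  induction raw_values using List.reverseRecOn with
  | nil => rfl
  | append_singleton xs x ih =>
    rw [List.foldl_append, List.foldl_append, ih]
    simp only [List.foldl_cons, List.foldl_nil]
    by_cases h : x.toList = []
    · simp [h]
    · rw [if_neg h, if_neg h, per_string]

-- ===== VERDICT (by name: the statement is the Claim_ definition above) =====
theorem normalized_photo_urls_py_spec : Claim_equal_normalized_photo_urls_py := by
  intro raw_values _
  exact ports_eq raw_values
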